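-- pv_equiv track=rewrite | github.com/OxaDev/ESIEE-E5FI-Algorithmie-Projet | Algorithmie_projet_BAUCHER_JOUNIOT_global.py | Entrepots_getMaxGain
-- ===== SOURCE A (Python) =====
-- def Entrepots_getMaxGain(G, already_done):
--     indic = 0
--     max = -1
--     indic_max = 0
--     for elem in already_done:
--         indic_not_done = 0
--         for i in range(len(elem)):
--             if(elem[i] == -1):
--                 indic_not_done = i
--                 break
--
--         if( indic_not_done == 0):
--             continue
--
--         diffGain = G[indic][indic_not_done] - G[indic][indic_not_done-1]
--         if(diffGain > max):
--             max = diffGain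
--             indic_max = indic
--         indic += 1
--
--     return indic_max
-- ===== SOURCE B (Python) =====
-- def Entrepots_getMaxGain(G, already_done):
--     # First unserved slot of each plan; a plan that is untouched or fully served
--     # (first slot -1, or no -1 at all) offers no marginal step and is dropped.
--     idxs = [i for i in ((e.index(-1) if -1 in e else 0) for e in already_done) if i != 0]
--     # Marginal gain of serving one more slot: pair the k-th candidate with row k of G.
--     gains = [row[i] - row[i - 1] for i, row in zip(idxs, G)]
--     if not gains or max(gains) < 0:
--         return 0
--     return gains.index(max(gains))
-- ===== Notes on version B (the rewrite author's own statement) =====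
-- stated objective: simpler
-- what changed: Replaces A's single loop threading three mutable counters (indic, max, indic_max) by three plain phases: collect the first-unserved index of each qualifying plan, zip those with the rows of G into a list of marginal gains, and return gains.index(max(gains)) with 0 when there is no candidate or the best gain is negative; Pre_ excludes only inputs on which A raises IndexError (more qualifying plans than rows of G, or a first-unserved index beyond its row's length).
import Mathlib
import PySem

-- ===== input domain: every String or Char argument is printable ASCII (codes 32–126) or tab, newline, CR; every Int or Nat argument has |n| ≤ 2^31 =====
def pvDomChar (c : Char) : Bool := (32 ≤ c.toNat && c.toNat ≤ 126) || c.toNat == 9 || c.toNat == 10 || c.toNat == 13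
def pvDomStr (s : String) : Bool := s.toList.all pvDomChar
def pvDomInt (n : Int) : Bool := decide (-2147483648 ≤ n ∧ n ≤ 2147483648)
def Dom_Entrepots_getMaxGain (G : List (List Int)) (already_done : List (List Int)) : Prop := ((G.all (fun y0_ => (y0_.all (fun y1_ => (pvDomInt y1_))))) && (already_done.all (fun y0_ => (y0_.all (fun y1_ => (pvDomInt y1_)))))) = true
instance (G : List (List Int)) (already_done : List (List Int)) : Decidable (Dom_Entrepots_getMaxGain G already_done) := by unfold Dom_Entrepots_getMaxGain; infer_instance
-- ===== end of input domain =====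

-- B replaces A's single loop threading three mutable counters by three plain phases
-- (first-unserved indices, marginal gains via zip with G, argmax); objective: simpler.

-- ===== PORT A =====
-- inner 'for i in range(len(elem)): if elem[i] == -1: indic_not_done = i; break'
def pvFindNeg : List Int → Nat → Nat
  | [], _ => 0
  | x :: xs, i => if x == -1 then i else pvFindNeg xs (i + 1)

-- one iteration of A's outer loop; state = (indic, max, indic_max)
def pvStepA (G : List (List Int)) (st : Nat × Int × Nat) (elem : List Int) : Nat × Int × Nat :=
  let idx := pvFindNeg elem 0
  if idx = 0 then st
  else
    let row := (PySem.List.pyGet? G (st.1 : Int)).getD []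
    let d := ((PySem.List.pyGet? row (idx : Int)).getD 0) - ((PySem.List.pyGet? row ((idx : Int) - 1)).getD 0)
    if d > st.2.1 then (st.1 + 1, d, st.1) else (st.1 + 1, st.2.1, st.2.2)

def Entrepots_getMaxGain (G : List (List Int)) (already_done : List (List Int)) : Int :=
  ((already_done.foldl (pvStepA G) (0, -1, 0)).2.2 : Nat)

-- ===== PORT B =====
-- 'e.index(-1) if -1 in e else 0'
def pvFirstUnserved (e : List Int) : Nat :=
  if -1 ∈ e then (PySem.List.index? e (-1)).getD 0 else 0

-- 'idxs = [i for i in (… for e in already_done) if i != 0]'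
def pvIdxsB (already_done : List (List Int)) : List Nat :=
  (already_done.map pvFirstUnserved).filter (fun i => decide (i ≠ 0))

-- 'row[i] - row[i-1]' for one pair (i, row) of zip(idxs, G)
def pvGainOf (p : Nat × List Int) : Int :=
  ((PySem.List.pyGet? p.2 (p.1 : Int)).getD 0) - ((PySem.List.pyGet? p.2 ((p.1 : Int) - 1)).getD 0)

def Entrepots_getMaxGain_alt (G : List (List Int)) (already_done : List (List Int)) : Int :=
  let gains := ((pvIdxsB already_done).zip G).map pvGainOf
  match PySem.List.max? gains (fun y => y) with
  | none => 0
  | some m => if m < 0 then 0 else (((PySem.List.index? gains m).getD 0 : Nat) : Int)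

-- ===== PRECONDITION & SPEC =====
-- first-(-1) indices of the rows of already_done that qualify (index ≠ 0)
def pvQualIdxs (already_done : List (List Int)) : List Nat :=
  (already_done.map (fun e => (e.findIdx? (fun v => v == -1)).getD 0)).filter (fun i => decide (i ≠ 0))

-- Pre_ excludes exactly the inputs on which Python A raises IndexError: the k-th qualifying
-- row reads G[k][idx]; outside Pre_, A raises.
def Pre_Entrepots_getMaxGain (G : List (List Int)) (already_done : List (List Int)) : Prop :=
  (pvQualIdxs already_done).length ≤ G.length ∧
  ∀ p ∈ (pvQualIdxs already_done).zip G, p.1 < p.2.length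
instance (G : List (List Int)) (already_done : List (List Int)) : Decidable (Pre_Entrepots_getMaxGain G already_done) := by unfold Pre_Entrepots_getMaxGain; infer_instance

def pvWitness_Entrepots_getMaxGain : List (List Int) × List (List Int) := ([[0, 5]], [[0, -1]])

def Spec_Entrepots_getMaxGain (G : List (List Int)) (already_done : List (List Int)) (out : Int) : Prop := out = Entrepots_getMaxGain_alt G already_done
instance (G : List (List Int)) (already_done : List (List Int)) (out : Int) : Decidable (Spec_Entrepots_getMaxGain G already_done out) := by unfold Spec_Entrepots_getMaxGain; infer_instance

-- ===== CLAIM (what is proved, stated in full; the proofs are below) =====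
def Claim_equal_Entrepots_getMaxGain : Prop := ∀ (G : List (List Int)) (already_done : List (List Int)), Dom_Entrepots_getMaxGain G already_done → Pre_Entrepots_getMaxGain G already_done → Spec_Entrepots_getMaxGain G already_done (Entrepots_getMaxGain G already_done)

-- ===== LEMMAS AND PROOFS =====

-- B's first-unserved index equals the findIdx?-based form used by Pre_
lemma pvFirstUnserved_eq (e : List Int) :
    pvFirstUnserved e = (e.findIdx? (fun v => v == -1)).getD 0 := by
  rw [pvFirstUnserved, PySem.List.index?_eq_idxOf?]
  by_cases h : (-1 : Int) ∈ e
  · simp only [h, if_pos]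
    have hix : e.idxOf? (-1) = e.findIdx? (fun v => v == -1) := by
      unfold List.idxOf?
      simp
    rw [hix]
  · have : e.findIdx? (fun v => v == -1) = none := by
      simp [List.findIdx?_eq_none_iff]
      intro x hx hxe
      exact h (by simpa [hxe] using hx)
    simp [h, this]

lemma pvIdxsB_eq (ad : List (List Int)) : pvIdxsB ad = pvQualIdxs ad := by
  unfold pvIdxsB pvQualIdxs
  congr 1
  exact List.map_congr_left (fun e _ => pvFirstUnserved_eq e)

-- A's running-max update, abstracted on the gain value
def pvTStep (st : Nat × Int × Nat) (d : Int) : Nat × Int × Nat :=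
  if d > st.2.1 then (st.1 + 1, d, st.1) else (st.1 + 1, st.2.1, st.2.2)

def pvTripleOf (g : List Int) : Nat × Int × Nat := g.foldl pvTStep (0, -1, 0)

-- proof-side reformulation of A's outer loop step over the list of gains built so far
def pvStepB (G : List (List Int)) (gains : List Int) (elem : List Int) : List Int :=
  let idx := (elem.findIdx? (fun v => v == -1)).getD 0
  if idx = 0 then gains
  else
    let row := (PySem.List.pyGet? G (gains.length : Int)).getD []
    gains ++ [((PySem.List.pyGet? row (idx : Int)).getD 0) - ((PySem.List.pyGet? row ((idx : Int) - 1)).getD 0)]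

lemma pvFindNeg_eq (e : List Int) :
    ∀ i, pvFindNeg e i =
      (match e.findIdx? (fun v => v == -1) with
       | some j => i + j
       | none => 0) := by
  induction e with
  | nil => intro i; simp [pvFindNeg]
  | cons x xs ih =>
      intro i
      simp only [pvFindNeg, List.findIdx?_cons]
      by_cases hx : x == -1
      · simp [hx]
      · simp only [hx, Bool.false_eq_true, if_false, ih]
        cases h : xs.findIdx? (fun v => v == -1) <;> simp [Nat.add_assoc, Nat.add_comm 1]

lemma pvTripleOf_append (g : List Int) (d : Int) :
    pvTripleOf (g ++ [d]) = pvTStep (pvTripleOf g) d := by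
  simp [pvTripleOf, List.foldl_append]

lemma pvTripleOf_fst (g : List Int) : (pvTripleOf g).1 = g.length := by
  induction g using List.reverseRecOn with
  | nil => rfl
  | append_singleton g d ih =>
      rw [pvTripleOf_append, pvTStep]
      split <;> simp [ih]

lemma pvMOf_neg_one_le (g : List Int) : -1 ≤ (pvTripleOf g).2.1 := by
  induction g using List.reverseRecOn with
  | nil => simp [pvTripleOf]
  | append_singleton g d ih =>
      rw [pvTripleOf_append, pvTStep]
      split <;> simp <;> omega

lemma pvMOf_isMax (g : List Int) : ∀ y ∈ g, y ≤ (pvTripleOf g).2.1 := by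
  induction g using List.reverseRecOn with
  | nil => simp
  | append_singleton g d ih =>
      intro y hy
      rw [pvTripleOf_append, pvTStep]
      rcases List.mem_append.mp hy with h | h
      · have := ih y h; split <;> (simp; omega)
      · simp at h; subst h; split <;> (simp; try omega)

lemma pvMOf_eq_foldl_max (g : List Int) : (pvTripleOf g).2.1 = g.foldl max (-1) := by
  induction g using List.reverseRecOn with
  | nil => rfl
  | append_singleton g d ih =>
      rw [pvTripleOf_append, pvTStep, List.foldl_append]
      split <;> simp [ih] <;> omega

lemma pvFoldlMax_swap (t : List Int) : ∀ a b, t.foldl max (max a b) = max a (t.foldl max b) := by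
  induction t with
  | nil => intro a b; rfl
  | cons y t ih =>
      intro a b
      simp only [List.foldl_cons]
      rw [max_assoc, ih]

-- A's loop invariant: the running argmax tracks first occurrence of the running max
lemma pvInv (g : List Int) :
    ((pvTripleOf g).2.1 > -1 → PySem.List.index? g (pvTripleOf g).2.1 = some (pvTripleOf g).2.2) ∧
    ((pvTripleOf g).2.1 ≤ -1 → (pvTripleOf g).2.2 = 0) := by
  induction g using List.reverseRecOn with
  | nil => constructor <;> intro h <;> simp_all [pvTripleOf]
  | append_singleton g d ih =>
      have hfst := pvTripleOf_fst g
      have hle := pvMOf_neg_one_le g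
      rw [pvTripleOf_append, pvTStep]
      by_cases hd : d > (pvTripleOf g).2.1
      · have hnotmem : d ∉ g := fun hm => absurd (pvMOf_isMax g d hm) (by omega)
        simp only [hd, if_pos]
        refine ⟨fun _ => ?_, fun h => absurd h (by omega)⟩
        rw [PySem.List.index?_append_singleton_self g d hnotmem, hfst]
      · simp only [hd, if_neg, not_false_iff]
        constructor
        · intro hm
          have hmem : (pvTripleOf g).2.1 ∈ g := by
            have h1 := ih.1 hm
            exact (PySem.List.index?_isSome_iff g (pvTripleOf g).2.1).mp (by rw [h1]; rfl)
          rw [PySem.List.index?_append_of_mem _ hmem]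
          exact ih.1 hm
        · intro hm
          exact ih.2 hm

-- B's extraction equals A's final argmax, for any gains list
lemma pvExtract_eq (g : List Int) :
    ((pvTripleOf g).2.2 : Int) =
      (match PySem.List.max? g (fun y => y) with
       | none => 0
       | some m => if m < 0 then 0 else (((PySem.List.index? g m).getD 0 : Nat) : Int)) := by
  cases g with
  | nil => simp [pvTripleOf, PySem.List.max?]
  | cons x t =>
      rw [PySem.List.max?_id_cons]
      have hm : (pvTripleOf (x :: t)).2.1 = max (-1) (t.foldl max x) := by
        rw [pvMOf_eq_foldl_max]
        simp only [List.foldl_cons]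
        have := pvFoldlMax_swap t (-1) x
        simpa using this
      by_cases hb : t.foldl max x < 0
      · have hm' : (pvTripleOf (x :: t)).2.1 = -1 := by omega
        have := (pvInv (x :: t)).2 (by omega)
        simp [hb, this]
      · have hm' : (pvTripleOf (x :: t)).2.1 = t.foldl max x := by omega
        have := (pvInv (x :: t)).1 (by omega)
        rw [hm'] at this
        simp only [PySem.List.index?_eq_idxOf?] at this
        simp [hb, this]

-- main loop correspondence: A's fold from the triple of g equals the triple of the gains fold from g
lemma pvMainFold (G : List (List Int)) (ad : List (List Int)) :
    ∀ g, ad.foldl (pvStepA G) (pvTripleOf g) = pvTripleOf (ad.foldl (pvStepB G) g) := by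
  induction ad with
  | nil => intro g; rfl
  | cons e ad ih =>
      intro g
      have hstep : pvStepA G (pvTripleOf g) e = pvTripleOf (pvStepB G g e) := by
        rw [pvStepA, pvStepB]
        have hidx : pvFindNeg e 0 = (e.findIdx? (fun v => v == -1)).getD 0 := by
          rw [pvFindNeg_eq]
          cases h : e.findIdx? (fun v => v == -1) <;> simp
        rw [hidx]
        by_cases h0 : (e.findIdx? (fun v => v == -1)).getD 0 = 0
        · simp [h0]
        · simp only [h0, if_neg, not_false_iff, pvTripleOf_fst]
          rw [pvTripleOf_append, pvTStep, pvTripleOf_fst]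
      simp only [List.foldl_cons, hstep, ih]

-- the gains fold, under Pre_'s length bound, builds exactly B's zip-with-G gains list
lemma pvGainsFold_eq (G : List (List Int)) :
    ∀ (ad : List (List Int)) (g : List Int),
      (pvQualIdxs ad).length + g.length ≤ G.length →
      ad.foldl (pvStepB G) g = g ++ ((pvQualIdxs ad).zip (G.drop g.length)).map pvGainOf := by
  intro ad
  induction ad with
  | nil => intro g _; simp [pvQualIdxs]
  | cons e ad ih =>
      intro g hlen
      have hqual : pvQualIdxs (e :: ad) =
          (if ((e.findIdx? (fun v => v == -1)).getD 0 : Nat) ≠ 0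
           then ((e.findIdx? (fun v => v == -1)).getD 0) :: pvQualIdxs ad
           else pvQualIdxs ad) := by
        unfold pvQualIdxs
        by_cases h : ((e.findIdx? (fun v => v == -1)).getD 0 : Nat) ≠ 0 <;> simp [h]
      by_cases h0 : ((e.findIdx? (fun v => v == -1)).getD 0 : Nat) = 0
      · rw [hqual] at hlen ⊢
        simp only [h0, ne_eq, not_true_eq_false, if_false] at hlen ⊢
        simp only [List.foldl_cons, pvStepB, h0, if_pos]
        exact ih g hlen
      · rw [hqual] at hlen ⊢
        simp only [h0, ne_eq, not_false_iff, if_pos, List.length_cons] at hlen ⊢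
        have hglt : g.length < G.length := by omega
        have hdrop : G.drop g.length = G[g.length] :: G.drop (g.length + 1) :=
          List.drop_eq_getElem_cons hglt
        have hrow : (PySem.List.pyGet? G (g.length : Int)).getD [] = G[g.length] := by
          rw [PySem.List.pyGet?_natCast, List.getElem?_eq_getElem hglt, Option.getD_some]
        simp only [List.foldl_cons, pvStepB, h0, if_neg, not_false_iff, hrow]
        rw [hdrop, List.zip_cons_cons, List.map_cons]
        have hih := ih (g ++ [pvGainOf ((e.findIdx? (fun v => v == -1)).getD 0, G[g.length])])
            (by simp; omega)
        simp only [pvGainOf] at hih ⊢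
        rw [hih]
        simp

lemma pvA_eq_triple (G : List (List Int)) (ad : List (List Int))
    (h : (pvQualIdxs ad).length ≤ G.length) :
    Entrepots_getMaxGain G ad = ((pvTripleOf (((pvQualIdxs ad).zip G).map pvGainOf)).2.2 : Int) := by
  rw [Entrepots_getMaxGain]
  have h0 : (0, -1, 0) = pvTripleOf ([] : List Int) := rfl
  rw [h0, pvMainFold, pvGainsFold_eq G ad [] (by simpa using h)]
  simp

-- ===== VERDICT (by name: the statement is the Claim_ definition above) =====
theorem Entrepots_getMaxGain_spec : Claim_equal_Entrepots_getMaxGain := by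
  intro G ad _ hpre
  unfold Spec_Entrepots_getMaxGain Entrepots_getMaxGain_alt
  rw [pvIdxsB_eq, pvA_eq_triple G ad hpre.1, pvExtract_eq]
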